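-- pv_equiv track=rewrite | github.com/sonjunhyun/Algorithm_Study | 프로그래머스/lv0/120864. 숨어있는 숫자의 덧셈 （2）/숨어있는 숫자의 덧셈 （2）.py | solution
-- ===== SOURCE A (Python) =====
-- def solution(my_string):
--     answer = 0
--     number_string = ""
--     for c in my_string:
--         if c.isdecimal():
--             number_string += c
--         else:
--             if number_string == "":
--                 pass
--             else:
--                 answer += int(number_string)
--                 number_string = ""
--     if not number_string == "":
--         answer += int(number_string)
--     return answer
-- ===== SOURCE B (Python) =====
-- def solution(my_string):
--     pieces = "".join(c if c.isdecimal() else " " for c in my_string).split()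
--     return sum(int(p) for p in pieces)
-- ===== Notes on version B (the rewrite author's own statement) =====
-- stated objective: idiomatic
-- what changed: Replaces the per-character accumulator state machine (with end-of-string flush) by tokenize-then-fold: blank out non-digit characters, split() into maximal digit runs, sum their int() values.
import Mathlib
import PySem

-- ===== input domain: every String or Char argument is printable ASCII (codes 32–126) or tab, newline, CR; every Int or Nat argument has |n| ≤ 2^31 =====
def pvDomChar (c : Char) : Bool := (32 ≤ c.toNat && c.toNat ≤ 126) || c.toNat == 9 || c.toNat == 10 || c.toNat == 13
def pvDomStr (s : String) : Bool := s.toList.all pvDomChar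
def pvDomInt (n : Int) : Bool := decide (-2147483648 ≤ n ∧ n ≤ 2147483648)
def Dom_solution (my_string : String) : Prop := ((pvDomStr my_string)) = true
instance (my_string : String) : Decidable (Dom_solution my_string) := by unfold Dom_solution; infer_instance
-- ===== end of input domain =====

-- B replaces A's per-character digit-accumulator state machine by an idiomatic
-- tokenize-then-fold: blank out non-digits, split into maximal digit runs, sum them.


-- int(s) for the nonempty all-digit strings both programs apply int() to: exact there
def pvIntOfDigits (cs : List Char) : Int :=
  cs.foldl (fun a c => a * 10 + ((c.toNat : Int) - 48)) 0

-- ===== PORT A =====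
-- number_string is carried as a List Char; c.isdecimal() = Chars.isdigit on the ASCII domain
def solution (my_string : String) : Int :=
  let st := my_string.toList.foldl
    (fun (p : Int × List Char) c =>
      if PySem.Chars.isdigit c then (p.1, p.2 ++ [c])
      else if p.2 = [] then p
      else (p.1 + pvIntOfDigits p.2, []))
    (0, [])
  if ¬ (st.2 = []) then st.1 + pvIntOfDigits st.2 else st.1

-- ===== PORT B =====
-- ''.join(c if c.isdecimal() else ' ' …).split() → split₀ of the mapped char list
def solution_alt (my_string : String) : Int :=
  let pieces := PySem.Chars.split₀
    (my_string.toList.map (fun c => if PySem.Chars.isdigit c then c else ' '))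
  (pieces.map pvIntOfDigits).foldl (· + ·) 0

-- ===== PRECONDITION & SPEC =====
def Spec_solution (my_string : String) (out : Int) : Prop := out = solution_alt my_string
instance (my_string : String) (out : Int) : Decidable (Spec_solution my_string out) := by unfold Spec_solution; infer_instance

-- ===== CLAIM (what is proved, stated in full; the proofs are below) =====
def Claim_equal_solution : Prop := ∀ (my_string : String), Dom_solution my_string → Spec_solution my_string (solution my_string)

-- ===== LEMMAS AND PROOFS =====

theorem pv_digit_not_space (c : Char) (h : PySem.Chars.isdigit c = true) :
    PySem.Chars.isspace c = false := by
  simp only [PySem.Chars.isdigit, Bool.and_eq_true, decide_eq_true_eq, Char.le_def] at h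
  obtain ⟨h1, h2⟩ := h
  have h1' : 48 ≤ c.toNat := h1
  have h2' : c.toNat ≤ 57 := h2
  simp only [PySem.Chars.isspace]
  simp
  omega

theorem pv_go_acc (s : List Char) : ∀ cur acc,
    PySem.Chars.split₀.go s cur acc = acc.reverse ++ PySem.Chars.split₀.go s cur [] := by
  induction s with
  | nil => intro cur acc; simp [PySem.Chars.split₀.go]; split_ifs <;> simp
  | cons c t ih =>
    intro cur acc
    simp only [PySem.Chars.split₀.go]
    split_ifs with h1 h2
    · exact ih [] acc
    · rw [ih [] (cur.reverse :: acc), ih [] [cur.reverse]]; simp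
    · exact ih (c :: cur) acc

theorem pv_foldl_add (xs : List Int) : ∀ a : Int, xs.foldl (· + ·) a = a + xs.foldl (· + ·) 0 := by
  induction xs with
  | nil => simp
  | cons x t ih => intro a; simp only [List.foldl_cons]; rw [ih (a + x), ih (0 + x)]; ring

theorem pv_main (l : List Char) : ∀ (ans : Int) (run : List Char),
    (let st := l.foldl
      (fun (p : Int × List Char) c =>
        if PySem.Chars.isdigit c then (p.1, p.2 ++ [c])
        else if p.2 = [] then p
        else (p.1 + pvIntOfDigits p.2, []))
      (ans, run)
     if ¬ (st.2 = []) then st.1 + pvIntOfDigits st.2 else st.1)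
    = ans + ((PySem.Chars.split₀.go
        (l.map (fun c => if PySem.Chars.isdigit c then c else ' ')) run.reverse []).map
          pvIntOfDigits).foldl (· + ·) 0 := by
  induction l with
  | nil =>
    intro ans run
    simp only [List.foldl_nil, List.map_nil, PySem.Chars.split₀.go]
    by_cases h : run = []
    · simp [h]
    · simp [h, List.isEmpty_iff]
  | cons c t ih =>
    intro ans run
    simp only [List.foldl_cons, List.map_cons, PySem.Chars.split₀.go]
    by_cases hd : PySem.Chars.isdigit c = true
    · rw [if_pos hd, if_pos hd, pv_digit_not_space c hd]
      simpa using ih ans (run ++ [c])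
    · rw [if_neg hd, if_neg hd]
      have hsp : PySem.Chars.isspace ' ' = true := by decide
      rw [hsp]
      by_cases hr : run = []
      · simp only [hr]
        simpa [hr] using ih ans []
      · rw [if_neg hr]
        have hne : (run.reverse).isEmpty = false := by simp [hr]
        rw [hne, if_neg Bool.false_ne_true, pv_go_acc _ [] [run.reverse.reverse],
          ih (ans + pvIntOfDigits run) []]
        simp only [List.reverse_reverse, List.reverse_cons, List.reverse_nil,
          List.nil_append, List.singleton_append, if_true, List.map_cons, List.foldl_cons]
        rw [pv_foldl_add _ (0 + pvIntOfDigits run)]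
        ring

-- ===== VERDICT (by name: the statement is the Claim_ definition above) =====
theorem solution_spec : Claim_equal_solution := by
  intro s _
  unfold Spec_solution solution solution_alt PySem.Chars.split₀
  simpa using pv_main s.toList 0 []
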